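-- pv_equiv track=rewrite | github.com/matushevskyi/profireader | profapp/controllers/views_front.py | get_tag_elastic_filter
-- ===== SOURCE A (Python) =====
-- def get_tag_elastic_filter(all_tags, tags_selected_by_user):
--     wrong_tag_found = False
--     elastic_filter = []
--     all_tags_text_id = {t['text']: t['id'] for t in all_tags}
--     selected_tag_names = []
--     if tags_selected_by_user:
--         for t in tags_selected_by_user.split('+'):
--             if t in all_tags_text_id:
--                 selected_tag_names.append(t)
--                 elastic_filter.append({'term': {'tag_ids': all_tags_text_id[t]}})
--             else:
--                 wrong_tag_found = True
--     return None if wrong_tag_found else elastic_filter, selected_tag_names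
-- ===== SOURCE B (Python) =====
-- def get_tag_elastic_filter(all_tags, tags_selected_by_user):
--     all_tags_text_id = {t['text']: t['id'] for t in all_tags}
--
--     def go(names):
--         # recursion on the tail: build both results back-to-front,
--         # propagating "wrong tag seen" as a None filter instead of a flag
--         if not names:
--             return [], []
--         flt, sel = go(names[1:])
--         t = names[0]
--         if t not in all_tags_text_id:
--             return None, sel
--         if flt is None:
--             return None, [t] + sel
--         return [{'term': {'tag_ids': all_tags_text_id[t]}}] + flt, [t] + sel
--
--     return go(tags_selected_by_user.split('+') if tags_selected_by_user else [])
-- ===== Notes on version B (the rewrite author's own statement) =====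
-- stated objective: alternative
-- what changed: A's forward loop threading a wrong_tag flag and two append accumulators is replaced by structural recursion on the name list that builds both results back-to-front by consing, with 'wrong tag seen' propagated as a None filter through the recursive result instead of a boolean flag.
import Mathlib
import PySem

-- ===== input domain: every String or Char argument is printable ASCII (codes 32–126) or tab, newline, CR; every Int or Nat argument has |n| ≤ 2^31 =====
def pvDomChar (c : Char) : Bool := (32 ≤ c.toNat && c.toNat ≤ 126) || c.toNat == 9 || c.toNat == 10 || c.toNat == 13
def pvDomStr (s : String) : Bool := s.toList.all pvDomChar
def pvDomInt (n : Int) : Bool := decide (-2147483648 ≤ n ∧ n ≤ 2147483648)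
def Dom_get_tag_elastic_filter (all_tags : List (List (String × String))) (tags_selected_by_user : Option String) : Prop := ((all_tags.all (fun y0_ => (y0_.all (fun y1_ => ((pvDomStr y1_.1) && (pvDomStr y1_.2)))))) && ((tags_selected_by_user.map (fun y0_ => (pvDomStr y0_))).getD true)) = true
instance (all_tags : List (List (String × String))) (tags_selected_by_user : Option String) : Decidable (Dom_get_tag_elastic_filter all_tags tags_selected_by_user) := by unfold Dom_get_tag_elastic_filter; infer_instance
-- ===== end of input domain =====

-- B replaces A's forward loop (wrong-tag flag + append accumulators) by structural recursion
-- on the name list, building both results back-to-front and propagating wrongness as a None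
-- filter through the recursive result. Objective: alternative (same cost).

-- ===== PORT A =====
-- t['text'] / t['id'] raise KeyError when missing; Pre_ excludes that, so the .getD "" default is never hit inside Pre_.
def get_tag_elastic_filter (all_tags : List (List (String × String))) (tags_selected_by_user : Option String) : (Option (List (List (String × List (String × String))))) × List String :=
  let all_tags_text_id : PySem.Dict String String :=
    all_tags.foldl (fun d t =>
      d.insert (((PySem.Dict.mk t).get? "text").getD "") (((PySem.Dict.mk t).get? "id").getD ""))
      PySem.Dict.empty
  let st : Bool × List (List (String × List (String × String))) × List String :=
    match tags_selected_by_user with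
    | none => (false, [], [])
    | some s =>
      if s = "" then (false, [], [])
      else
        ((PySem.Str.split? s "+").getD []).foldl (fun st t =>
          match all_tags_text_id.get? t with
          | some v => (st.1, st.2.1 ++ [[("term", [("tag_ids", v)])]], st.2.2 ++ [t])
          | none => (true, st.2)) (false, [], [])
  (if st.1 then none else some st.2.1, st.2.2)

-- ===== PORT B =====
-- the inner recursive helper go(names) of Source B
def pvGo (d : PySem.Dict String String) : List String → (Option (List (List (String × List (String × String))))) × List String
  | [] => (some [], [])
  | t :: rest =>
    let r := pvGo d rest
    if !(d.contains t) then (none, r.2)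
    else
      match r.1 with
      | none => (none, t :: r.2)
      | some flt => (some ([("term", [("tag_ids", d.getD t "")])] :: flt), t :: r.2)

def get_tag_elastic_filter_alt (all_tags : List (List (String × String))) (tags_selected_by_user : Option String) : (Option (List (List (String × List (String × String))))) × List String :=
  let all_tags_text_id : PySem.Dict String String :=
    all_tags.foldl (fun d t =>
      d.insert (((PySem.Dict.mk t).get? "text").getD "") (((PySem.Dict.mk t).get? "id").getD ""))
      PySem.Dict.empty
  pvGo all_tags_text_id
    (match tags_selected_by_user with
     | none => []
     | some s => if s = "" then [] else (PySem.Str.split? s "+").getD [])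

-- ===== PRECONDITION & SPEC =====
-- Pre_ excludes exactly the inputs where the Python A raises KeyError: a tag dict missing key 'text' or 'id' (B raises there too).
def Pre_get_tag_elastic_filter (all_tags : List (List (String × String))) (tags_selected_by_user : Option String) : Prop :=
  all_tags.all (fun t => (PySem.Dict.mk t).contains "text" && (PySem.Dict.mk t).contains "id") = true
instance (all_tags : List (List (String × String))) (tags_selected_by_user : Option String) : Decidable (Pre_get_tag_elastic_filter all_tags tags_selected_by_user) := by unfold Pre_get_tag_elastic_filter; infer_instance
def pvWitness_get_tag_elastic_filter : (List (List (String × String))) × Option String := ([[("text", "a"), ("id", "1")]], some "a+b")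
def Spec_get_tag_elastic_filter (all_tags : List (List (String × String))) (tags_selected_by_user : Option String) (out : (Option (List (List (String × List (String × String))))) × List String) : Prop := out = get_tag_elastic_filter_alt all_tags tags_selected_by_user
instance (all_tags : List (List (String × String))) (tags_selected_by_user : Option String) (out : (Option (List (List (String × List (String × String))))) × List String) : Decidable (Spec_get_tag_elastic_filter all_tags tags_selected_by_user out) := by
  unfold Spec_get_tag_elastic_filter
  have h1 : DecidableEq (String × List (String × String)) := inferInstance
  have h2 : DecidableEq (List (String × List (String × String))) := @instDecidableEqList _ h1
  have h3 : DecidableEq (List (List (String × List (String × String)))) := @instDecidableEqList _ h2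
  have h4 : DecidableEq (Option (List (List (String × List (String × String))))) := @Option.instDecidableEq _ h3
  exact @instDecidableEqProd _ _ h4 inferInstance _ _

-- ===== CLAIM (what is proved, stated in full; the proofs are below) =====
def Claim_equal_get_tag_elastic_filter : Prop := ∀ (all_tags : List (List (String × String))) (tags_selected_by_user : Option String), Dom_get_tag_elastic_filter all_tags tags_selected_by_user → Pre_get_tag_elastic_filter all_tags tags_selected_by_user → Spec_get_tag_elastic_filter all_tags tags_selected_by_user (get_tag_elastic_filter all_tags tags_selected_by_user)

-- ===== LEMMAS AND PROOFS =====

-- closed characterisation of B's recursion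
theorem pv_go (d : PySem.Dict String String) (names : List String) :
    pvGo d names
    = (if names.any (fun t => !(d.contains t)) then none
       else some ((names.filter (fun t => d.contains t)).map
         (fun t => [("term", [("tag_ids", d.getD t "")])])),
       names.filter (fun t => d.contains t)) := by
  induction names with
  | nil => simp [pvGo]
  | cons t rest ih =>
    by_cases hc : d.contains t = true
    · by_cases hw : rest.any (fun t => !(d.contains t)) = true
      · simp [pvGo, ih, hc, hw]
      · simp [pvGo, ih, hc, hw]
    · have hc' : d.contains t = false := Bool.eq_false_iff.mpr hc
      simp [pvGo, ih, hc']

-- A's fused loop, started from any accumulator, equals the decomposed passes appended to it.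
theorem pv_loop (d : PySem.Dict String String) (names : List String)
    (w : Bool) (ef : List (List (String × List (String × String)))) (sel : List String) :
    names.foldl (fun st t =>
        match d.get? t with
        | some v => (st.1, st.2.1 ++ [[("term", [("tag_ids", v)])]], st.2.2 ++ [t])
        | none => (true, st.2)) (w, ef, sel)
    = (w || names.any (fun t => !(d.contains t)),
       ef ++ (names.filter (fun t => d.contains t)).map
         (fun t => [("term", [("tag_ids", d.getD t "")])]),
       sel ++ names.filter (fun t => d.contains t)) := by
  induction names generalizing w ef sel with
  | nil => simp
  | cons t names ih =>
    cases h : d.get? t with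
    | some v =>
      have hc : d.contains t = true := by
        rw [PySem.Dict.contains_eq_isSome_get?, h]; rfl
      have hg : d.getD t "" = v := by rw [PySem.Dict.getD_eq_get?_getD, h]; rfl
      simp [List.foldl_cons, h, ih, hc, hg]
    | none =>
      have hc : d.contains t = false := by
        rw [PySem.Dict.contains_eq_isSome_get?, h]; rfl
      simp [List.foldl_cons, h, ih, hc]

-- ===== VERDICT (by name: the statement is the Claim_ definition above) =====
theorem get_tag_elastic_filter_spec : Claim_equal_get_tag_elastic_filter := by
  intro all_tags tsel _ _
  unfold Spec_get_tag_elastic_filter get_tag_elastic_filter get_tag_elastic_filter_alt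
  cases tsel with
  | none => simp [pvGo]
  | some s =>
    by_cases hs : s = ""
    · simp [hs, pvGo]
    · simp only [hs, if_false, pv_loop, pv_go, Bool.false_or, List.nil_append]
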